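-- pv_equiv track=rewrite | github.com/DerJator/Algorithm-Challenges | hw_algorithms/src/ZK_CryptKick/cryptkick_ZK2.py | match_ref_shape
-- ===== SOURCE A (Python) =====
-- space_pos = {3, 9, 15, 19, 25, 30, 34, 39}
--
-- reference_str = "the quick brown fox jumps over the lazy dog"
--
-- def match_ref_shape(string: str):
--     # Length of string must match
--     if len(string) != len(reference_str):
--         return False
--
--     spaces = set()
--     letters = set()
--
--     # Positions of spaces must match
--     for c_ix, c in enumerate(string):
--         if c == ' ':
--             spaces.add(c_ix)
--         else:
--             letters.add(c)
--
--     if spaces != space_pos: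
--         return False
--
--     return True
-- ===== SOURCE B (Python) =====
-- reference_str = "the quick brown fox jumps over the lazy dog"
--
-- def match_ref_shape(string: str):
--     if len(string) != len(reference_str):
--         return False
--     return all((c == ' ') == (r == ' ') for c, r in zip(string, reference_str))
-- ===== Notes on version B (the rewrite author's own statement) =====
-- stated objective: simpler
-- what changed: Instead of accumulating the space indices into a set (plus an unused letters set) and comparing it with the precomputed constant index set, B zips the string with the reference string once and checks position-by-position that spaces coincide, keeping no intermediate collection.
import Mathlib
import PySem

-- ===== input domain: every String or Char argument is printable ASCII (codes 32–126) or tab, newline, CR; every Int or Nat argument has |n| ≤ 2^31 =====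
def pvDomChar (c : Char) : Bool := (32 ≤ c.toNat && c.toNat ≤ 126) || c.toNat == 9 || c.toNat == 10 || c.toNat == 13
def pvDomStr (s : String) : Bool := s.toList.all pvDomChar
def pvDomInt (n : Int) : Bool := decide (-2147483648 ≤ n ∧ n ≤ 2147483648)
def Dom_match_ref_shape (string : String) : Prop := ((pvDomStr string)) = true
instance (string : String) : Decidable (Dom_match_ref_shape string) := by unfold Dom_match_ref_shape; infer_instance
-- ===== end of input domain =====

-- B replaces A's index-set accumulation (and unused letters set) plus set comparison
-- by a single zip with the reference string, checking spaces position-by-position (simpler).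

-- ===== PORT A =====
def refStr : String := "the quick brown fox jumps over the lazy dog"

def spacePos : PySem.Set Int := PySem.Set.ofList [3, 9, 15, 19, 25, 30, 34, 39]

-- loop body of A's 'for c_ix, c in enumerate(string)'
def stepA (st : PySem.Set Int × PySem.Set Char) (p : Int × Char) : PySem.Set Int × PySem.Set Char :=
  if p.2 == ' ' then (PySem.Set.add st.1 p.1, st.2) else (st.1, PySem.Set.add st.2 p.2)

def match_ref_shape (string : String) : Bool :=
  if PySem.Str.len string ≠ PySem.Str.len refStr then false
  else
    let st := (PySem.List.enumerate string.toList 0).foldl stepA (PySem.Set.empty, PySem.Set.empty)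
    if ¬ PySem.Set.equal st.1 spacePos then false else true

-- ===== PORT B =====
def match_ref_shape_alt (string : String) : Bool :=
  if PySem.Str.len string ≠ PySem.Str.len refStr then false
  else (string.toList.zip refStr.toList).all (fun p => (p.1 == ' ') == (p.2 == ' '))

-- ===== PRECONDITION & SPEC =====
def Spec_match_ref_shape (string : String) (out : Bool) : Prop := out = match_ref_shape_alt string
instance (string : String) (out : Bool) : Decidable (Spec_match_ref_shape string out) := by unfold Spec_match_ref_shape; infer_instance

-- ===== CLAIM (what is proved, stated in full; the proofs are below) =====
def Claim_equal_match_ref_shape : Prop := ∀ (string : String), Dom_match_ref_shape string → Spec_match_ref_shape string (match_ref_shape string)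

-- ===== LEMMAS AND PROOFS =====

theorem refStr_len : refStr.toList.length = 43 := by decide

-- characterization of the first component of A's fold: the set of space positions
theorem mem_fold_fst (cs : List Char) : ∀ (s : Int) (S : PySem.Set Int) (L : PySem.Set Char) (y : Int),
    y ∈ ((PySem.List.enumerate cs s).foldl stepA (S, L)).1 ↔
      y ∈ S ∨ ∃ k : Nat, ∃ hk : k < cs.length, cs[k] = ' ' ∧ y = s + k := by
  induction cs with
  | nil => intro s S L y; simp [PySem.List.enumerate_nil]
  | cons c cs ih =>
    intro s S L y
    rw [PySem.List.enumerate_cons, List.foldl_cons]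
    by_cases hc : c = ' '
    · have hstep : stepA (S, L) (s, c) = (PySem.Set.add S s, L) := by
        simp [stepA, hc]
      rw [hstep, ih (s + 1) (PySem.Set.add S s) L y, PySem.Set.mem_add]
      constructor
      · rintro ((hS | rfl) | ⟨k, hk, hsp, rfl⟩)
        · exact Or.inl hS
        · exact Or.inr ⟨0, by simp, by simpa using hc, by simp⟩
        · exact Or.inr ⟨k + 1, by simp; omega, by simpa using hsp, by push_cast; ring⟩
      · rintro (hS | ⟨k, hk, hsp, rfl⟩)
        · exact Or.inl (Or.inl hS)
        · cases k with
          | zero => exact Or.inl (Or.inr (by simp))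
          | succ k =>
            exact Or.inr ⟨k, by simp at hk; omega, by simpa using hsp, by push_cast; ring⟩
    · have hstep : stepA (S, L) (s, c) = (S, PySem.Set.add L c) := by
        simp [stepA, hc]
      rw [hstep, ih (s + 1) S (PySem.Set.add L c) y]
      constructor
      · rintro (hS | ⟨k, hk, hsp, rfl⟩)
        · exact Or.inl hS
        · exact Or.inr ⟨k + 1, by simp; omega, by simpa using hsp, by push_cast; ring⟩
      · rintro (hS | ⟨k, hk, hsp, rfl⟩)
        · exact Or.inl hS
        · cases k with
          | zero => exact absurd (by simpa using hsp) hc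
          | succ k =>
            exact Or.inr ⟨k, by simp at hk; omega, by simpa using hsp, by push_cast; ring⟩

-- the reference string's spaces are exactly at the positions in spacePos
theorem ref_space_fact : ∀ k : Fin 43,
    (refStr.toList[k.val]'(by rw [refStr_len]; exact k.isLt) = ' ') ↔
      ((k.val : Int) ∈ ([3, 9, 15, 19, 25, 30, 34, 39] : List Int)) := by decide

theorem spacePos_eq : spacePos = [3, 9, 15, 19, 25, 30, 34, 39] := by decide

theorem key_bridge (cs : List Char) (h : cs.length = 43) :
    PySem.Set.equal
        ((PySem.List.enumerate cs 0).foldl stepA (PySem.Set.empty, PySem.Set.empty)).1 spacePos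
      = (cs.zip refStr.toList).all (fun p => (p.1 == ' ') == (p.2 == ' ')) := by
  rw [Bool.eq_iff_iff, PySem.Set.equal_iff, List.all_eq_true]
  constructor
  · rintro hset ⟨a, b⟩ hmem
    obtain ⟨i, hi, hget⟩ := List.mem_iff_getElem.mp hmem
    have hi43 : i < 43 := by
      have := List.length_zip (l₁ := cs) (l₂ := refStr.toList)
      omega
    rw [List.getElem_zip] at hget
    obtain ⟨ha, hb⟩ := Prod.mk.injEq .. ▸ hget
    have hr := ref_space_fact ⟨i, hi43⟩
    simp only [← ha, ← hb]
    have hs := hset (i : Int)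
    rw [mem_fold_fst, spacePos_eq] at hs
    simp only [PySem.Set.empty] at hs
    by_cases hc : cs[i]'(by omega) = ' '
    · have : ((i : Int) ∈ ([3, 9, 15, 19, 25, 30, 34, 39] : List Int)) :=
        hs.mp (Or.inr ⟨i, by omega, hc, by omega⟩)
      simp [hc, hr.mpr this]
    · have hnr : ¬ refStr.toList[i]'(by rw [refStr_len]; omega) = ' ' := by
        intro hsp
        rcases hs.mpr (hr.mp hsp) with h0 | ⟨k, hk, hksp, hik⟩
        · simp at h0
        · have : k = i := by omega
          exact hc (this ▸ hksp)
      simp [hc, hnr]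
  · intro hall y
    rw [mem_fold_fst, spacePos_eq]
    simp only [PySem.Set.empty]
    have hpoint : ∀ i : Nat, (hi : i < 43) → ((cs[i]'(by omega) = ' ') ↔
        ((i : Int) ∈ ([3, 9, 15, 19, 25, 30, 34, 39] : List Int))) := by
      intro i hi
      have hmem : (cs[i]'(by omega), refStr.toList[i]'(by rw [refStr_len]; omega)) ∈ cs.zip refStr.toList := by
        rw [List.mem_iff_getElem]
        refine ⟨i, ?_, ?_⟩
        · rw [List.length_zip, h, refStr_len]; omega
        · rw [List.getElem_zip]
      have hbeq := hall _ hmem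
      have hiff : (cs[i]'(by omega) = ' ') ↔ (refStr.toList[i]'(by rw [refStr_len]; omega) = ' ') := by
        by_cases hx : cs[i]'(by omega) = ' ' <;>
          by_cases hy : refStr.toList[i]'(by rw [refStr_len]; omega) = ' ' <;>
          simp [hx, hy] at hbeq ⊢
      exact hiff.trans (ref_space_fact ⟨i, hi⟩)
    constructor
    · rintro (h0 | ⟨k, hk, hksp, rfl⟩)
      · simp at h0
      · have := (hpoint k (by omega)).mp hksp
        simpa using this
    · intro hy
      have hbounds : 0 ≤ y ∧ y < 43 := by
        rcases (by simpa using hy : y = 3 ∨ y = 9 ∨ y = 15 ∨ y = 19 ∨ y = 25 ∨ y = 30 ∨ y = 34 ∨ y = 39) with rfl|rfl|rfl|rfl|rfl|rfl|rfl|rfl <;> omega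
      refine Or.inr ⟨y.toNat, by omega, ?_, by omega⟩
      exact (hpoint y.toNat (by omega)).mpr (by rwa [Int.toNat_of_nonneg hbounds.1])

-- ===== VERDICT (by name: the statement is the Claim_ definition above) =====
theorem match_ref_shape_spec : Claim_equal_match_ref_shape := by
  intro string _
  unfold Spec_match_ref_shape match_ref_shape match_ref_shape_alt
  by_cases hlen : PySem.Str.len string ≠ PySem.Str.len refStr
  · rw [if_pos hlen, if_pos hlen]
  · rw [if_neg hlen, if_neg hlen]
    have h43 : string.toList.length = 43 := by
      have heq : PySem.Str.len string = PySem.Str.len refStr := not_not.mp hlen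
      rw [PySem.Str.len_eq, PySem.Str.len_eq, refStr_len] at heq
      omega
    show (if ¬ PySem.Set.equal ((PySem.List.enumerate string.toList 0).foldl stepA (PySem.Set.empty, PySem.Set.empty)).1 spacePos then false else true) = _
    rw [key_bridge string.toList h43]
    rcases Bool.eq_false_or_eq_true
        ((string.toList.zip refStr.toList).all (fun p => (p.1 == ' ') == (p.2 == ' '))) with hz | hz <;>
      rw [hz] <;> simp
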